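-- pv_equiv track=rewrite | github.com/HilltopWorks/BokuNoNatsuyasumi2 | textCompaction.py | getSubstringFrequency
-- ===== SOURCE A (Python) =====
-- def getSubstringFrequency(s, n):
--     substrings=[s[j:j+n]for j in range(len(s)-n+1)]
--
--     unique_substrings = set(substrings)
--     frequencies = {}
--
--     for substring in unique_substrings:
--         #count = len(re.findall(s, substring))
--         count = substrings.count(substring)
--         frequencies[substring] = count
--
--     return frequencies
-- ===== SOURCE B (Python) =====
-- def getSubstringFrequency(s, n):
--     frequencies = {}
--     for j in range(len(s) - n + 1):
--         sub = s[j:j+n]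
--         frequencies[sub] = frequencies.get(sub, 0) + 1
--     return frequencies
-- ===== Notes on version B (the rewrite author's own statement) =====
-- stated objective: alternative
-- what changed: Replaces the dedupe-into-a-set-then-rescan-the-list-once-per-unique-substring strategy with a single pass that increments a dict counter as each substring is produced.
import Mathlib
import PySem

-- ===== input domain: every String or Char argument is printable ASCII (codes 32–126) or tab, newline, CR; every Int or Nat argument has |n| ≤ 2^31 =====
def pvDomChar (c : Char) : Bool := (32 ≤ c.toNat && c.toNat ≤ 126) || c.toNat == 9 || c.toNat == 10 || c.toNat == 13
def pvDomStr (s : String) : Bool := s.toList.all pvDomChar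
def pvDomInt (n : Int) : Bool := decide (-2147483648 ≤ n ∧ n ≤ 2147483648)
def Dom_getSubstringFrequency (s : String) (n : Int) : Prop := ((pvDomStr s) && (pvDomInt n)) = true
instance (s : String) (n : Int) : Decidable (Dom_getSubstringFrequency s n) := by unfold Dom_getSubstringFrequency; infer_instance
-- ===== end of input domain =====

-- B replaces A's dedupe-into-a-set-then-rescan-per-unique-substring counting with a single
-- pass that increments a dict counter as each substring is produced (alternative algorithm).
-- A iterates a Python set to build the result dict; the dict's KEY ORDER is hash order and
-- outputs are compared as dicts (ignoring order); the port uses first-occurrence order.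

-- ===== PORT A =====
def getSubstringFrequency (s : String) (n : Int) : List (String × Int) :=
  let substrings : List String :=
    (PySem.List.pyRange 0 (PySem.Str.len s - n + 1) 1).map
      (fun j => PySem.Str.slice s (some j) (some (j + n)))
  let uniqueSubstrings : PySem.Set String := PySem.Set.ofList substrings
  let frequencies : PySem.Dict String Int :=
    uniqueSubstrings.foldl
      (fun d substring => d.insert substring ((PySem.List.count substrings substring : Nat) : Int))
      PySem.Dict.empty
  frequencies.items

-- ===== PORT B =====
def getSubstringFrequency_alt (s : String) (n : Int) : List (String × Int) :=
  let frequencies : PySem.Dict String Int :=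
    (PySem.List.pyRange 0 (PySem.Str.len s - n + 1) 1).foldl
      (fun d j =>
        let sub := PySem.Str.slice s (some j) (some (j + n))
        d.insert sub (d.getD sub 0 + 1))
      PySem.Dict.empty
  frequencies.items

-- ===== PRECONDITION & SPEC =====
def Spec_getSubstringFrequency (s : String) (n : Int) (out : List (String × Int)) : Prop := out = getSubstringFrequency_alt s n
instance (s : String) (n : Int) (out : List (String × Int)) : Decidable (Spec_getSubstringFrequency s n out) := by unfold Spec_getSubstringFrequency; infer_instance

-- ===== CLAIM (what is proved, stated in full; the proofs are below) =====
def Claim_equal_getSubstringFrequency : Prop := ∀ (s : String) (n : Int), Dom_getSubstringFrequency s n → Spec_getSubstringFrequency s n (getSubstringFrequency s n)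

-- ===== LEMMAS AND PROOFS =====

-- B's fold over the index range is the counter of the substring list.
theorem alt_eq_counter_items (s : String) (n : Int) :
    getSubstringFrequency_alt s n =
      (PySem.Dict.counter ((PySem.List.pyRange 0 (PySem.Str.len s - n + 1) 1).map
        (fun j => PySem.Str.slice s (some j) (some (j + n))))).items := by
  unfold getSubstringFrequency_alt
  dsimp only
  rw [← PySem.Dict.foldl_insert_getD_add_one_eq_counter]
  simp only [List.foldl_map]

-- A's fold over the deduplicated set appends one fresh item per unique substring.
theorem a_eq_counter_items (s : String) (n : Int) :
    getSubstringFrequency s n =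
      (PySem.Dict.counter ((PySem.List.pyRange 0 (PySem.Str.len s - n + 1) 1).map
        (fun j => PySem.Str.slice s (some j) (some (j + n))))).items := by
  unfold getSubstringFrequency
  dsimp only
  rw [PySem.Dict.items_counter]
  have h := PySem.Dict.items_foldl_insert_fresh
      (PySem.Set.ofList ((PySem.List.pyRange 0 (PySem.Str.len s - n + 1) 1).map
        (fun j => PySem.Str.slice s (some j) (some (j + n)))))
      (fun a => a)
      (fun a => ((PySem.List.count ((PySem.List.pyRange 0 (PySem.Str.len s - n + 1) 1).map
        (fun j => PySem.Str.slice s (some j) (some (j + n)))) a : Nat) : Int))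
      PySem.Dict.empty
      (fun a _ => PySem.Dict.contains_empty a)
      (by simp)
  simp [PySem.List.count_eq] at h
  exact h

-- ===== VERDICT (by name: the statement is the Claim_ definition above) =====
theorem getSubstringFrequency_spec : Claim_equal_getSubstringFrequency := by
  intro s n _
  unfold Spec_getSubstringFrequency
  rw [alt_eq_counter_items, a_eq_counter_items]
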